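-- pv_equiv track=rewrite | github.com/Jordan-M-Young/FetchApp | modules/ner.py | get_relevant_entities
-- ===== SOURCE A (Python) =====
-- def get_relevant_entities(combined_ner_results: list) -> dict:
--     """extracts the name of the purchasing customer and
--     the name of the vendor from the input results
--     """
--
--     customer = ''
--     company = ''
--
--
--     for result in combined_ner_results:
--
--         if customer and company:
--             break
--
--
--         if not customer:
--             if result[1] == "PER":
--                 customer = result[0]
--
--
--         if not company:
--             if result[1] == "ORG":
--                 company = result[0]
--
--
--     return {"company":company, "customer": customer }
-- ===== SOURCE B (Python) =====
-- def get_relevant_entities(combined_ner_results: list) -> dict: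
--     """extracts the name of the purchasing customer and
--     the name of the vendor from the input results
--     """
--     customer = next((r[0] for r in combined_ner_results if r[1] == "PER" and r[0]), '')
--     company = next((r[0] for r in combined_ner_results if r[1] == "ORG" and r[0]), '')
--     return {"company": company, "customer": customer}
-- ===== Notes on version B (the rewrite author's own statement) =====
-- stated objective: simpler
-- what changed: Replaces the single stateful loop with two flag variables and an early break by two independent first-match scans (next over a generator) for the first nonempty PER and ORG names.
import Mathlib
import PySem

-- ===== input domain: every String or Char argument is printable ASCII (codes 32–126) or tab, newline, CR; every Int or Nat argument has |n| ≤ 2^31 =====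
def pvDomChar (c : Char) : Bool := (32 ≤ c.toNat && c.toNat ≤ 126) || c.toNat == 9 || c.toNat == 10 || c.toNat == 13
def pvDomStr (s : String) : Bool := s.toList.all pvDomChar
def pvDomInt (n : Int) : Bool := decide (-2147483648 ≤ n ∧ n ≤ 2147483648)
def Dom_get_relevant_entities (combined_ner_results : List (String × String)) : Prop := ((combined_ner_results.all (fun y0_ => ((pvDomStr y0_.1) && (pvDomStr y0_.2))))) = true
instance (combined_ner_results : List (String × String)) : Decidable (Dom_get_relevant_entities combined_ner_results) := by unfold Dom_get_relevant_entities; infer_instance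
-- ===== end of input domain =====

-- B replaces A's single stateful loop (two flags + early break) by two independent
-- first-match scans; objective: simpler.

-- ===== PORT A =====
-- the for-loop of A: state = (customer, company), early break when both truthy
def pvLoopA : List (String × String) → String → String → String × String
  | [], customer, company => (customer, company)
  | r :: rest, customer, company =>
    if customer ≠ "" ∧ company ≠ "" then (customer, company)
    else
      let customer := if customer = "" then (if r.2 = "PER" then r.1 else customer) else customer
      let company := if company = "" then (if r.2 = "ORG" then r.1 else company) else company
      pvLoopA rest customer company

def get_relevant_entities (combined_ner_results : List (String × String)) : List (String × String) :=
  let p := pvLoopA combined_ner_results "" ""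
  [("company", p.2), ("customer", p.1)]

-- ===== PORT B =====
-- next((r[0] for r in xs if r[1] == tag and r[0]), '')
def pvFirstName (tag : String) (xs : List (String × String)) : String :=
  ((xs.find? (fun r => r.2 == tag && r.1 != "")).map Prod.fst).getD ""

def get_relevant_entities_alt (combined_ner_results : List (String × String)) : List (String × String) :=
  let customer := pvFirstName "PER" combined_ner_results
  let company := pvFirstName "ORG" combined_ner_results
  [("company", company), ("customer", customer)]

-- ===== PRECONDITION & SPEC =====
def Spec_get_relevant_entities (combined_ner_results : List (String × String)) (out : List (String × String)) : Prop := out = get_relevant_entities_alt combined_ner_results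
instance (combined_ner_results : List (String × String)) (out : List (String × String)) : Decidable (Spec_get_relevant_entities combined_ner_results out) := by unfold Spec_get_relevant_entities; infer_instance

-- ===== CLAIM (what is proved, stated in full; the proofs are below) =====
def Claim_equal_get_relevant_entities : Prop := ∀ (combined_ner_results : List (String × String)), Dom_get_relevant_entities combined_ner_results → Spec_get_relevant_entities combined_ner_results (get_relevant_entities combined_ner_results)

-- ===== LEMMAS AND PROOFS =====

-- find? on a cons, phrased propositionally
theorem pvFirstName_cons (tag : String) (r : String × String) (rest : List (String × String)) :
    pvFirstName tag (r :: rest) =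
      if r.2 = tag ∧ r.1 ≠ "" then r.1 else pvFirstName tag rest := by
  by_cases h : r.2 = tag ∧ r.1 ≠ ""
  · have hb : (r.1 != "") = true := by simp [h.2]
    simp [pvFirstName, List.find?, hb, h.1, h]
  · have hb : (r.2 == tag && r.1 != "") = false := by
      rw [Bool.eq_false_iff]
      intro hb
      exact h (by simpa using hb)
    simp [pvFirstName, List.find?, hb, h]

-- loop invariant: A's loop fills each still-empty slot with the first nonempty match
theorem pvLoopA_eq (xs : List (String × String)) :
    ∀ (c co : String),
      pvLoopA xs c co =
        ((if c = "" then pvFirstName "PER" xs else c),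
         (if co = "" then pvFirstName "ORG" xs else co)) := by
  induction xs with
  | nil =>
    intro c co
    simp [pvLoopA, pvFirstName]
  | cons r rest ih =>
    intro c co
    simp only [pvLoopA]
    by_cases hb : c ≠ "" ∧ co ≠ ""
    · simp [hb]
    · simp only [hb, if_false]
      rw [ih, pvFirstName_cons, pvFirstName_cons]
      by_cases hc : c = "" <;> by_cases hco : co = "" <;>
        by_cases hP : r.2 = "PER" <;> by_cases hO : r.2 = "ORG" <;>
        by_cases hn : r.1 = "" <;>
        simp_all

theorem get_relevant_entities_spec' (xs : List (String × String)) :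
    get_relevant_entities xs = get_relevant_entities_alt xs := by
  simp [get_relevant_entities, get_relevant_entities_alt, pvLoopA_eq]

-- ===== VERDICT (by name: the statement is the Claim_ definition above) =====
theorem get_relevant_entities_spec : Claim_equal_get_relevant_entities := by
  intro xs _
  exact get_relevant_entities_spec' xs
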